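-- pv_equiv track=rewrite | github.com/HermonMulat/Euler | p62.py | process
-- ===== SOURCE A (Python) =====
-- def process(a_list,limit):
--
--     for i in range(len(a_list)):
--         match = [a_list[i]]
--         d = sorted(list(str(a_list[i])))
--         for j in range(i+1,len(a_list)):
--             if d == sorted(list(str(a_list[j]))):
--                 match.append(a_list[j])
--         if len(match) == limit:
--             return match
-- ===== SOURCE B (Python) =====
-- def process(a_list, limit):
--     # Build groups by sorted-digit signature once, then scan positions in order:
--     # at the k-th occurrence of a signature, the remaining group members are g[k:].
--     groups = {}
--     for x in a_list:
--         groups.setdefault(''.join(sorted(str(x))), []).append(x)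
--     seen = {}
--     for x in a_list:
--         s = ''.join(sorted(str(x)))
--         k = seen.get(s, 0)
--         g = groups[s]
--         if len(g) - k == limit:
--             return g[k:]
--         seen[s] = k + 1
-- ===== Notes on version B (the rewrite author's own statement) =====
-- stated objective: faster
-- what changed: Replaces the quadratic nested scan (for each i, rescan the whole tail comparing signatures) with a single hash-grouping pass by sorted-digit signature plus one ordered scan that reads each group's remaining-tail count from an occurrence counter.
import Mathlib
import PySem

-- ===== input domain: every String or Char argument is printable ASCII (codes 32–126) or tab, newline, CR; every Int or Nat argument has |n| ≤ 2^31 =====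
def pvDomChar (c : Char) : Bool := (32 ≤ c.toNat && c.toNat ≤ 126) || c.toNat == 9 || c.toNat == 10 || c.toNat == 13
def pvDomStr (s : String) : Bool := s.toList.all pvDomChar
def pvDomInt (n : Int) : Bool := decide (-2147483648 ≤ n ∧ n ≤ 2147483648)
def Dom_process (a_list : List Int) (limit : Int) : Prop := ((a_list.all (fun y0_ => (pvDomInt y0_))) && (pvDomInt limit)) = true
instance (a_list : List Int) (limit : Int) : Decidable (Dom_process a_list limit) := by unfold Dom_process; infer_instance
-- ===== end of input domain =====

-- B groups the numbers by sorted-digit signature in one pass and then reads each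
-- match as the remaining slice of its group, instead of A's quadratic rescans of the tail.

-- shared helper: sorted(list(str(n))) — the digit-permutation signature both programs compute
def pvSig (n : Int) : List Char := PySem.List.sorted (PySem.Int.toStr n).toList (fun c => c)

-- ===== PORT A =====
def process (a_list : List Int) (limit : Int) : Option (List Int) :=
  match a_list with
  | [] => none
  | x :: rest =>
    let d := pvSig x
    let m := rest.foldl (fun acc y => if d = pvSig y then acc ++ [y] else acc) [x]
    if (m.length : Int) = limit then some m else process rest limit

-- ===== PORT B =====
-- groups[sig].append(x) for each x, in order
def pvGroups (a_list : List Int) : PySem.Dict (List Char) (List Int) :=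
  a_list.foldl (fun d x => d.modify (pvSig x) [] (fun g => g ++ [x])) PySem.Dict.empty

-- the second loop of Source B: seen counts earlier occurrences of each signature
def processAltGo (groups : PySem.Dict (List Char) (List Int))
    (seen : PySem.Dict (List Char) Int) (rest : List Int) (limit : Int) : Option (List Int) :=
  match rest with
  | [] => none
  | x :: rest =>
    let s := pvSig x
    let k := seen.getD s 0
    let g := groups.getD s []
    if (g.length : Int) - k = limit then some (PySem.List.slice g (some k) none)
    else processAltGo groups (seen.insert s (k + 1)) rest limit

def process_alt (a_list : List Int) (limit : Int) : Option (List Int) :=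
  processAltGo (pvGroups a_list) PySem.Dict.empty a_list limit

-- ===== PRECONDITION & SPEC =====
def Spec_process (a_list : List Int) (limit : Int) (out : Option (List Int)) : Prop := out = process_alt a_list limit
instance (a_list : List Int) (limit : Int) (out : Option (List Int)) : Decidable (Spec_process a_list limit out) := by unfold Spec_process; infer_instance

-- ===== CLAIM (what is proved, stated in full; the proofs are below) =====
def Claim_equal_process : Prop := ∀ (a_list : List Int) (limit : Int), Dom_process a_list limit → Spec_process a_list limit (process a_list limit)

-- ===== LEMMAS AND PROOFS =====

-- the groups dict, looked up at s, is exactly the ordered sublist of elements with signature s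
lemma pvGroups_getD (l : List Int) :
    ∀ (d : PySem.Dict (List Char) (List Int)) (s : List Char),
      (l.foldl (fun d x => d.modify (pvSig x) [] (fun g => g ++ [x])) d).getD s []
        = d.getD s [] ++ l.filter (fun y => pvSig y == s) := by
  induction l with
  | nil => intro d s; simp
  | cons x rest ih =>
    intro d s
    simp only [List.foldl_cons, List.filter_cons]
    rw [ih]
    by_cases h : s = pvSig x
    · subst h
      simp
    · rw [PySem.Dict.getD_modify]
      simp [h, Ne.symm h, beq_iff_eq]

-- A's inner loop collects the tail elements with signature d, appended to the accumulator
lemma pvInner (l : List Int) (d : List Char) :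
    ∀ (init : List Int),
      l.foldl (fun acc y => if d = pvSig y then acc ++ [y] else acc) init
        = init ++ l.filter (fun y => pvSig y == d) := by
  induction l with
  | nil => intro init; simp
  | cons x rest ih =>
    intro init
    simp only [List.foldl_cons, List.filter_cons]
    by_cases h : d = pvSig x
    · rw [if_pos h, ih]; simp [← h]
    · rw [if_neg h, ih]; simp [beq_iff_eq, Ne.symm h]

-- main invariant: walking the suffix with 'seen' = per-signature counts over the prefix
lemma pvMain (cur : List Int) :
    ∀ (pre : List Int) (seen : PySem.Dict (List Char) Int) (limit : Int),
      (∀ s, seen.getD s 0 = ((pre.filter (fun y => pvSig y == s)).length : Int)) →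
      process cur limit = processAltGo (pvGroups (pre ++ cur)) seen cur limit := by
  induction cur with
  | nil => intro pre seen limit _; rfl
  | cons x rest ih =>
    intro pre seen limit hseen
    simp only [process, processAltGo]
    have hg : (pvGroups (pre ++ x :: rest)).getD (pvSig x) []
        = pre.filter (fun y => pvSig y == pvSig x)
          ++ x :: rest.filter (fun y => pvSig y == pvSig x) := by
      unfold pvGroups
      rw [pvGroups_getD]
      simp [List.filter_append]
    rw [pvInner, hg, hseen]
    have hcond : ((([x] ++ rest.filter (fun y => pvSig y == pvSig x)).length : Int) = limit)
        ↔ (((pre.filter (fun y => pvSig y == pvSig x)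
              ++ x :: rest.filter (fun y => pvSig y == pvSig x)).length : Int)
            - ((pre.filter (fun y => pvSig y == pvSig x)).length : Int) = limit) := by
      simp only [List.length_append, List.length_cons, List.length_nil]
      push_cast
      omega
    by_cases hc : (([x] ++ rest.filter (fun y => pvSig y == pvSig x)).length : Int) = limit
    · rw [if_pos hc, if_pos (hcond.mp hc)]
      rw [PySem.List.slice_from_natCast]
      rw [List.drop_left]
      simp
    · rw [if_neg hc, if_neg (fun h => hc (hcond.mpr h))]
      have hassoc : pre ++ x :: rest = (pre ++ [x]) ++ rest := by simp
      rw [hassoc]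
      apply ih
      intro s
      rw [PySem.Dict.getD_insert]
      by_cases h : s = pvSig x
      · subst h
        simp [List.filter_append]
      · simp [h, hseen, List.filter_append, beq_iff_eq, Ne.symm h]

-- ===== VERDICT (by name: the statement is the Claim_ definition above) =====
theorem process_spec : Claim_equal_process := by
  intro a_list limit _
  unfold Spec_process process_alt
  have := pvMain a_list [] PySem.Dict.empty limit (by intro s; simp)
  simpa using this
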